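-- pv_equiv track=rewrite | github.com/liupengsay/PyIsTheBestLang | src/mathmatics/bit_operation.py | lc_1734
-- ===== SOURCE A (Python) =====
-- from functools import reduce
-- from operator import xor, or_
-- from typing import List
--
-- def lc_1734(encoded: List[int]) -> List[int]:
--     # 模板：经典变换公式，解码相邻异或值编码，并利用奇数排列的异或性质
--     n = len(encoded) + 1
--     total = 1 if n % 4 == 1 else 0  # n=4*k+1 与 n=4*k+3
--     odd = reduce(xor, encoded[1::2])
--     ans = [total ^ odd]
--     for num in encoded:
--         ans.append(ans[-1] ^ num)
--     return ans
-- ===== SOURCE B (Python) =====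
-- def lc_1734(encoded):
--     m = len(encoded)
--     whole = 0
--     odd = 0
--     for i, num in enumerate(encoded):
--         whole ^= num
--         if i % 2 == 1:
--             odd ^= num
--     first = (1 if m % 4 == 0 else 0) ^ odd
--     cur = first ^ whole
--     out = [cur]
--     for num in reversed(encoded):
--         cur ^= num
--         out.append(cur)
--     out.reverse()
--     return out
-- ===== Notes on version B (the rewrite author's own statement) =====
-- stated objective: alternative
-- what changed: B replaces A's slice-plus-reduce and forward append loop by one combined enumerate pass (whole-list XOR and odd-index XOR together, using len%4==0 instead of A's (len+1)%4==1 closed form) and then reconstructs the permutation back-to-front starting from its LAST element, reversing at the end.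
import Mathlib
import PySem

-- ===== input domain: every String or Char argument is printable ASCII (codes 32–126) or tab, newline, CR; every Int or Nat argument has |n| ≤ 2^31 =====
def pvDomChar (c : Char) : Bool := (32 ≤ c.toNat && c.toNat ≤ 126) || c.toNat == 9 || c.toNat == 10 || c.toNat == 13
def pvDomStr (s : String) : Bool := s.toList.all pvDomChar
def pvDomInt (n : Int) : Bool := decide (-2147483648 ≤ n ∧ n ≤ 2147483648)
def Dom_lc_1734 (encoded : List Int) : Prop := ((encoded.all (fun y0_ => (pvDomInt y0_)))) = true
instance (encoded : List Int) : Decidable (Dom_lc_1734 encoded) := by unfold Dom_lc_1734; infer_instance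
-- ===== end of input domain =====

-- B decodes the same adjacent-XOR encoding with one combined forward pass (whole-list
-- and odd-index XOR together, no slicing and no closed form over n = len+1) and then
-- builds the answer back-to-front from the LAST element, reversing at the end
-- (objective: alternative; equivalence of return values on lists of length ≥ 2).

-- ===== PORT A =====

-- functools.reduce(xor, l): Python raises TypeError on an empty l, which Pre_lc_1734
-- excludes; the [] branch value is never reached on admitted inputs.
def pvReduceXor (l : List Int) : Int :=
  match l with
  | [] => 0
  | h :: t => t.foldl (fun acc x => PySem.Int.bxor acc x) h

def lc_1734 (encoded : List Int) : List Int :=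
  let n : Int := (encoded.length : Int) + 1
  let total : Int := if PySem.Int.mod n 4 = 1 then 1 else 0
  -- odd = reduce(xor, encoded[1::2]); a step-2 slice never raises, so getD's default is dead
  let odd : Int := pvReduceXor ((PySem.List.slice? encoded (some 1) none 2).getD [])
  -- ans = [total ^ odd]; for num in encoded: ans.append(ans[-1] ^ num)
  (encoded.foldl
    (fun (p : List Int × Int) num =>
      (p.1 ++ [PySem.Int.bxor p.2 num], PySem.Int.bxor p.2 num))
    ([PySem.Int.bxor total odd], PySem.Int.bxor total odd)).1

-- ===== PORT B =====

def lc_1734_alt (encoded : List Int) : List Int :=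
  let m : Int := (encoded.length : Int)
  -- one pass over enumerate(encoded): whole = XOR of all, odd = XOR of odd-index elements
  let wo : Int × Int :=
    (PySem.List.enumerate encoded).foldl
      (fun (p : Int × Int) iv =>
        (PySem.Int.bxor p.1 iv.2,
         if PySem.Int.mod iv.1 2 = 1 then PySem.Int.bxor p.2 iv.2 else p.2))
      (0, 0)
  let first : Int := PySem.Int.bxor (if PySem.Int.mod m 4 = 0 then 1 else 0) wo.2
  -- cur = first ^ whole is the LAST element; walk encoded backwards, then reverse
  let start : Int := PySem.Int.bxor first wo.1
  let out : List Int × Int :=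
    encoded.reverse.foldl
      (fun (p : List Int × Int) num =>
        (p.1 ++ [PySem.Int.bxor p.2 num], PySem.Int.bxor p.2 num))
      ([start], start)
  out.1.reverse

-- ===== PRECONDITION & SPEC =====

-- Pre_ excludes exactly the inputs of length < 2, on which A raises TypeError
-- (reduce() of the empty slice encoded[1::2]).
def Pre_lc_1734 (encoded : List Int) : Prop := 2 ≤ encoded.length
instance (encoded : List Int) : Decidable (Pre_lc_1734 encoded) := by unfold Pre_lc_1734; infer_instance

def pvWitness_lc_1734 : List Int := [3, 1]

def Spec_lc_1734 (encoded : List Int) (out : List Int) : Prop := out = lc_1734_alt encoded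
instance (encoded : List Int) (out : List Int) : Decidable (Spec_lc_1734 encoded out) := by unfold Spec_lc_1734; infer_instance

-- ===== CLAIM (what is proved, stated in full; the proofs are below) =====
def Claim_equal_lc_1734 : Prop := ∀ (encoded : List Int), Dom_lc_1734 encoded → Pre_lc_1734 encoded → Spec_lc_1734 encoded (lc_1734 encoded)

-- ===== LEMMAS AND PROOFS =====

-- sign/magnitude coding of an Int, used to lift Nat.xor_assoc to PySem.Int.bxor
def pvMkI (s : Bool) (m : Nat) : Int := if s then -(m : Int) - 1 else (m : Int)

lemma pvMkI_repr (a : Int) : a = pvMkI (decide (a < 0)) (if 0 ≤ a then a.toNat else (-a - 1).toNat) := by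
  by_cases h : a < 0 <;> simp [pvMkI, h] <;> omega

lemma bxor_mkI (s₁ s₂ : Bool) (m₁ m₂ : Nat) :
    PySem.Int.bxor (pvMkI s₁ m₁) (pvMkI s₂ m₂) = pvMkI (s₁ ^^ s₂) (m₁ ^^^ m₂) := by
  have h₁ : ¬ (1:Int) ≤ -(m₁:Int) := by omega
  have h₂ : ¬ (1:Int) ≤ -(m₂:Int) := by omega
  cases s₁ <;> cases s₂ <;> simp [pvMkI, PySem.Int.bxor, h₁, h₂]

lemma bxor_assoc' (a b c : Int) :
    PySem.Int.bxor (PySem.Int.bxor a b) c = PySem.Int.bxor a (PySem.Int.bxor b c) := by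
  rw [pvMkI_repr a, pvMkI_repr b, pvMkI_repr c]
  rw [bxor_mkI, bxor_mkI, bxor_mkI, bxor_mkI]
  rw [Bool.xor_assoc, Nat.xor_assoc]

lemma zero_bxor (a : Int) : PySem.Int.bxor 0 a = a := by
  rw [PySem.Int.bxor_comm]; exact PySem.Int.bxor_zero a

-- XOR of a whole list
def pvXa (l : List Int) : Int := l.foldl (fun acc x => PySem.Int.bxor acc x) 0

lemma foldl_bxor_shift (l : List Int) : ∀ (d c : Int),
    l.foldl (fun acc x => PySem.Int.bxor acc x) (PySem.Int.bxor d c)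
      = PySem.Int.bxor d (l.foldl (fun acc x => PySem.Int.bxor acc x) c) := by
  induction l with
  | nil => intro d c; simp
  | cons a t ih => intro d c; simp only [List.foldl_cons, bxor_assoc', ih]

lemma foldl_bxor_eq (l : List Int) (c : Int) :
    l.foldl (fun acc x => PySem.Int.bxor acc x) c = PySem.Int.bxor c (pvXa l) := by
  have h := foldl_bxor_shift l c 0
  rw [PySem.Int.bxor_zero] at h
  exact h

lemma pvXa_cons (a : Int) (t : List Int) : pvXa (a :: t) = PySem.Int.bxor a (pvXa t) := by
  show (a :: t).foldl _ 0 = _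
  rw [List.foldl_cons, zero_bxor, foldl_bxor_eq]

lemma pvXa_append_singleton (l : List Int) (a : Int) :
    pvXa (l ++ [a]) = PySem.Int.bxor (pvXa l) a := by
  simp [pvXa, List.foldl_append]

lemma pvXa_reverse (l : List Int) : pvXa l.reverse = pvXa l := by
  induction l with
  | nil => rfl
  | cons a t ih =>
      rw [List.reverse_cons, pvXa_append_singleton, ih, pvXa_cons, PySem.Int.bxor_comm]

-- reduce(xor, l) agrees with the 0-seeded fold on every list
lemma pvReduceXor_eq (l : List Int) : pvReduceXor l = pvXa l := by
  cases l with
  | nil => rfl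
  | cons h t => show t.foldl _ h = pvXa (h :: t); rw [pvXa_cons, ← foldl_bxor_eq]

-- elements at odd indices
def pvOddE : List Int → List Int
  | [] => []
  | [_] => []
  | _ :: b :: t => b :: pvOddE t

lemma oddE_filterMap (xs : List Int) :
    pvOddE xs = (List.range (xs.length / 2)).filterMap
      (fun (k : Nat) => xs[((1:Int) + 2 * (k : Int)).toNat]?) := by
  induction xs using pvOddE.induct with
  | case1 => rfl
  | case2 a => simp [pvOddE]
  | case3 a b t ih =>
      have hlen : (a :: b :: t).length / 2 = t.length / 2 + 1 := by
        simp [List.length_cons]; omega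
      rw [hlen, List.range_succ_eq_map, List.filterMap_cons, List.filterMap_map]
      have h0 : (((1:Int) + 2 * ((0:Nat) : Int)).toNat) = 1 := by decide
      show pvOddE (a :: b :: t) = _
      simp only [pvOddE, h0]
      rw [List.getElem?_cons_succ]
      simp only [List.getElem?_cons_zero]
      rw [ih]
      congr 1

-- encoded[1::2] is exactly the odd-index elements
lemma slice_one_two (xs : List Int) :
    (PySem.List.slice? xs (some 1) none 2).getD [] = pvOddE xs := by
  cases xs with
  | nil => rfl
  | cons a t =>
      rw [oddE_filterMap]
      simp only [PySem.List.slice?, PySem.List.sliceIndices]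
      have hmin : min (1:Int) ((a::t).length : Int) = 1 := by
        simp only [List.length_cons]; push_cast; omega
      norm_num [hmin]
      congr 1
      congr 1
      split_ifs <;> omega

-- the enumerate fold computes (whole-list XOR, odd-index XOR)
lemma enum_fold (l : List Int) : ∀ (s w o : Int), PySem.Int.mod s 2 = 0 →
    (PySem.List.enumerate l s).foldl
      (fun (p : Int × Int) iv =>
        (PySem.Int.bxor p.1 iv.2,
         if PySem.Int.mod iv.1 2 = 1 then PySem.Int.bxor p.2 iv.2 else p.2))
      (w, o)
    = (PySem.Int.bxor w (pvXa l), PySem.Int.bxor o (pvXa (pvOddE l))) := by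
  induction l using pvOddE.induct with
  | case1 =>
      intro s w o hs
      simp [PySem.List.enumerate_nil, pvXa, pvOddE]
  | case2 a =>
      intro s w o hs
      have h1 : ¬ s % 2 = 1 := by
        rw [PySem.Int.mod_eq_emod_of_pos (by omega)] at hs; omega
      simp [PySem.List.enumerate_cons, PySem.List.enumerate_nil, h1, pvXa, pvOddE,
        zero_bxor]
  | case3 a b t ih =>
      intro s w o hs
      have h1 : ¬ PySem.Int.mod s 2 = 1 := by rw [hs]; decide
      have h2 : PySem.Int.mod (s+1) 2 = 1 := by
        rw [PySem.Int.mod_eq_emod_of_pos (by omega)]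
        rw [PySem.Int.mod_eq_emod_of_pos (by omega)] at hs
        omega
      have h3 : PySem.Int.mod (s+1+1) 2 = 0 := by
        rw [PySem.Int.mod_eq_emod_of_pos (by omega)]
        rw [PySem.Int.mod_eq_emod_of_pos (by omega)] at hs
        omega
      simp only [PySem.List.enumerate_cons, List.foldl_cons]
      simp only [h1, h2, if_true, if_false]
      rw [ih (s+1+1) _ _ h3]
      congr 1
      · rw [pvXa_cons, pvXa_cons, bxor_assoc', bxor_assoc']
      · show _ = PySem.Int.bxor o (pvXa (pvOddE (a :: b :: t)))
        simp only [pvOddE]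
        rw [pvXa_cons, bxor_assoc']

-- the forward running-XOR list that both loops produce
def pvFwd (x : Int) : List Int → List Int
  | [] => [x]
  | a :: t => x :: pvFwd (PySem.Int.bxor x a) t

-- both ports' append loops build pvFwd
lemma fold_build (l : List Int) : ∀ (acc : List Int) (x : Int),
    (l.foldl
      (fun (p : List Int × Int) num =>
        (p.1 ++ [PySem.Int.bxor p.2 num], PySem.Int.bxor p.2 num))
      (acc ++ [x], x)).1 = acc ++ pvFwd x l := by
  induction l with
  | nil => intro acc x; simp [pvFwd]
  | cons a t ih =>
      intro acc x
      rw [List.foldl_cons]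
      have h := ih (acc ++ [x]) (PySem.Int.bxor x a)
      simp only [List.append_assoc] at h ⊢
      simpa [pvFwd] using h

lemma fwd_snoc (r : List Int) : ∀ (x a : Int),
    pvFwd x (r ++ [a]) = pvFwd x r ++ [PySem.Int.bxor (PySem.Int.bxor x (pvXa r)) a] := by
  induction r with
  | nil => intro x a; simp [pvFwd, pvXa]
  | cons b r' ih =>
      intro x a
      simp only [List.cons_append, pvFwd, ih, pvXa_cons, List.cons_append]
      rw [← bxor_assoc']

-- building backwards from x ^ XOR(l) and reversing gives the forward list
lemma fwd_reverse (l : List Int) : ∀ (x : Int),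
    (pvFwd (PySem.Int.bxor x (pvXa l)) l.reverse).reverse = pvFwd x l := by
  induction l with
  | nil => intro x; simp [pvFwd, pvXa]
  | cons a t ih =>
      intro x
      have hC : PySem.Int.bxor x (pvXa (a :: t)) = PySem.Int.bxor (PySem.Int.bxor x a) (pvXa t) := by
        rw [pvXa_cons, bxor_assoc']
      rw [List.reverse_cons, fwd_snoc, List.reverse_append, pvXa_reverse, hC,
        ih (PySem.Int.bxor x a)]
      have hv : PySem.Int.bxor (PySem.Int.bxor (PySem.Int.bxor (PySem.Int.bxor x a) (pvXa t)) (pvXa t)) a = x := by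
        rw [bxor_assoc' (PySem.Int.bxor x a), PySem.Int.bxor_self, PySem.Int.bxor_zero,
          bxor_assoc', PySem.Int.bxor_self, PySem.Int.bxor_zero]
      rw [hv]
      rfl

-- the two closed-form parities agree: (len+1) % 4 == 1 iff len % 4 == 0
lemma total_eq (len : Nat) :
    (if PySem.Int.mod ((len : Int) + 1) 4 = 1 then (1:Int) else 0)
      = (if PySem.Int.mod (len : Int) 4 = 0 then (1:Int) else 0) := by
  rw [PySem.Int.mod_eq_emod_of_pos (by omega), PySem.Int.mod_eq_emod_of_pos (by omega)]
  by_cases h : ((len : Int) + 1) % 4 = 1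
  · rw [if_pos h, if_pos (by omega)]
  · rw [if_neg h, if_neg (by omega)]

-- ===== VERDICT (by name: the statement is the Claim_ definition above) =====
theorem lc_1734_spec : Claim_equal_lc_1734 := by
  intro encoded _ _
  show lc_1734 encoded = lc_1734_alt encoded
  dsimp only [lc_1734, lc_1734_alt]
  rw [slice_one_two, pvReduceXor_eq, total_eq,
    enum_fold encoded 0 0 0 (by decide), zero_bxor, zero_bxor]
  have hA := fold_build encoded []
    (PySem.Int.bxor (if PySem.Int.mod ((encoded.length : Int)) 4 = 0 then (1:Int) else 0)
      (pvXa (pvOddE encoded)))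
  have hB := fold_build encoded.reverse []
    (PySem.Int.bxor
      (PySem.Int.bxor (if PySem.Int.mod ((encoded.length : Int)) 4 = 0 then (1:Int) else 0)
        (pvXa (pvOddE encoded)))
      (pvXa encoded))
  simp only [List.nil_append] at hA hB
  rw [hA, hB, fwd_reverse]
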